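-- pv_equiv track=rewrite | github.com/henrique589/Heuristicas-Metaheuristicas | src/trabalho1/grasp/mochila.py | busca_local
-- ===== SOURCE A (Python) =====
-- def funcao_avaliacao(solucao):
--     valor_total = sum(valor for _, valor in solucao)
--     peso_total = sum(peso for peso, _ in solucao)
--     return valor_total, peso_total
--
-- def busca_local(solucao, itens, capacidade):
--     melhor_solucao = solucao[:]
--     melhor_valor, _ = funcao_avaliacao(melhor_solucao)
--
--     melhorou = True
--     while melhorou:
--         melhorou = False
--         for item in itens:
--             if item not in melhor_solucao and item[0] <= capacidade - sum(peso for peso, _ in melhor_solucao):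
--                 nova_solucao = melhor_solucao + [item]
--                 novo_valor, _ = funcao_avaliacao(nova_solucao)
--                 if novo_valor > melhor_valor:
--                     melhor_solucao = nova_solucao
--                     melhor_valor = novo_valor
--                     melhorou = True
--     return melhor_solucao
-- ===== SOURCE B (Python) =====
-- def busca_local(solucao, itens, capacidade):
--     sol = solucao[:]
--     peso = sum(p for p, _ in sol)
--     pendentes = [item for item in itens if item[1] > 0]
--     cresceu = True
--     while cresceu and pendentes:
--         cresceu = False
--         restantes = []
--         for item in pendentes:
--             if item in sol:
--                 continue
--             if item[0] <= capacidade - peso: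
--                 sol.append(item)
--                 peso += item[0]
--                 cresceu = True
--             else:
--                 restantes.append(item)
--         pendentes = restantes
--     return sol
-- ===== Notes on version B (the rewrite author's own statement) =====
-- stated objective: faster
-- what changed: Replaces A's rescan-everything fixpoint (which re-sums the solution's weight for every candidate on every pass and recomputes total values) with a shrinking worklist of positive-value items and an incrementally maintained running weight, so dead items are never revisited and no sums are recomputed.
import Mathlib
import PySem

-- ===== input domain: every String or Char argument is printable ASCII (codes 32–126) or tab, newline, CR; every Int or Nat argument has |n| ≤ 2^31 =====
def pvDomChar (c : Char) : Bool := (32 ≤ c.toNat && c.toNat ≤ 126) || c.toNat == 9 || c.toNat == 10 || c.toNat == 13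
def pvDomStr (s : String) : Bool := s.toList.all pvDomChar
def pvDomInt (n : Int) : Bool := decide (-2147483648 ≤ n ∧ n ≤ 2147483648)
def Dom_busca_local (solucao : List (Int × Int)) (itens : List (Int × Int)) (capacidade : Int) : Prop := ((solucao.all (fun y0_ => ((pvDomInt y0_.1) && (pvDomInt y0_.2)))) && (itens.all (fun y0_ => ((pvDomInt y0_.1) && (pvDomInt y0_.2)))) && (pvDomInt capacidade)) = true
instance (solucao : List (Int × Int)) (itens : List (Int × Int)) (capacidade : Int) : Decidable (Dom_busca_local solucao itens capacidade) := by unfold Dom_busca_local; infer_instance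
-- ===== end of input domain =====

-- B replaces A's rescan-everything fixpoint with a shrinking worklist of positive-value
-- items and an incrementally maintained running weight (objective: faster).

-- ===== PORT A =====
-- sum(valor for _, valor in l)
def valorTotal (l : List (Int × Int)) : Int := l.foldl (fun a p => a + p.2) 0
-- sum(peso for peso, _ in l)
def pesoTotal (l : List (Int × Int)) : Int := l.foldl (fun a p => a + p.1) 0

def funcao_avaliacao (solucao : List (Int × Int)) : Int × Int :=
  (valorTotal solucao, pesoTotal solucao)

-- the body of A's `for item in itens:` loop (one pass); `sol ++ [item]` is nova_solucao,
-- `(funcao_avaliacao (sol ++ [item])).1` is novo_valor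
def passA (cap : Int) : List (Int × Int) → List (Int × Int) → Int → Bool →
    List (Int × Int) × Int × Bool
  | [], sol, val, m => (sol, val, m)
  | item :: tl, sol, val, m =>
    if item ∉ sol ∧ item.1 ≤ cap - pesoTotal sol then
      if (funcao_avaliacao (sol ++ [item])).1 > val then
        passA cap tl (sol ++ [item]) ((funcao_avaliacao (sol ++ [item])).1) true
      else passA cap tl sol val m
    else passA cap tl sol val m

-- A's `while melhorou:` loop; the fuel `itens.length + 1` only makes the recursion
-- structural (each improving pass adds an item of itens not yet in the solution, so the
-- loop always stops within that many passes)
def loopA (cap : Int) (itens : List (Int × Int)) : Nat → List (Int × Int) → Int → List (Int × Int)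
  | 0, sol, _ => sol
  | n + 1, sol, val =>
    let st := passA cap itens sol val false
    if st.2.2 then loopA cap itens n st.1 st.2.1 else st.1

def busca_local (solucao : List (Int × Int)) (itens : List (Int × Int)) (capacidade : Int) : List (Int × Int) :=
  let melhor_solucao := solucao
  let melhor_valor := (funcao_avaliacao melhor_solucao).1
  loopA capacidade itens (itens.length + 1) melhor_solucao melhor_valor

-- ===== PORT B =====
-- the body of B's `for item in pendentes:` loop (one pass over the worklist)
def passB (cap : Int) : List (Int × Int) → List (Int × Int) → Int → List (Int × Int) → Bool →
    List (Int × Int) × Int × List (Int × Int) × Bool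
  | [], sol, peso, rest, cresceu => (sol, peso, rest, cresceu)
  | item :: tl, sol, peso, rest, cresceu =>
    if item ∈ sol then passB cap tl sol peso rest cresceu
    else if item.1 ≤ cap - peso then passB cap tl (sol ++ [item]) (peso + item.1) rest true
    else passB cap tl sol peso (rest ++ [item]) cresceu

-- B's `while cresceu and pendentes:` loop; fuel again only for structural recursion
def loopB (cap : Int) : Nat → List (Int × Int) → Int → List (Int × Int) → List (Int × Int)
  | 0, sol, _, _ => sol
  | n + 1, sol, peso, pendentes =>
    if pendentes = [] then sol
    else
      let st := passB cap pendentes sol peso [] false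
      if st.2.2.2 then loopB cap n st.1 st.2.1 st.2.2.1 else st.1

def busca_local_alt (solucao : List (Int × Int)) (itens : List (Int × Int)) (capacidade : Int) : List (Int × Int) :=
  let sol := solucao
  let peso := pesoTotal sol
  let pendentes := itens.filter (fun item => decide (0 < item.2))
  loopB capacidade (itens.length + 1) sol peso pendentes

-- ===== PRECONDITION & SPEC =====
def Spec_busca_local (solucao : List (Int × Int)) (itens : List (Int × Int)) (capacidade : Int) (out : List (Int × Int)) : Prop := out = busca_local_alt solucao itens capacidade
instance (solucao : List (Int × Int)) (itens : List (Int × Int)) (capacidade : Int) (out : List (Int × Int)) : Decidable (Spec_busca_local solucao itens capacidade out) := by unfold Spec_busca_local; infer_instance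

-- ===== CLAIM (what is proved, stated in full; the proofs are below) =====
def Claim_equal_busca_local : Prop := ∀ (solucao : List (Int × Int)) (itens : List (Int × Int)) (capacidade : Int), Dom_busca_local solucao itens capacidade → Spec_busca_local solucao itens capacidade (busca_local solucao itens capacidade)

-- ===== LEMMAS AND PROOFS =====

theorem valorTotal_snoc (l : List (Int × Int)) (x : Int × Int) :
    valorTotal (l ++ [x]) = valorTotal l + x.2 := by
  simp [valorTotal, List.foldl_append]

theorem pesoTotal_snoc (l : List (Int × Int)) (x : Int × Int) :
    pesoTotal (l ++ [x]) = pesoTotal l + x.1 := by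
  simp [pesoTotal, List.foldl_append]

-- Skel sol0 itens pending: pending is the subsequence of itens obtained by dropping
-- occurrences that are permanently skippable (non-positive value, or already in sol0)
inductive Skel (sol0 : List (Int × Int)) : List (Int × Int) → List (Int × Int) → Prop
  | nil : Skel sol0 [] []
  | keep (it : Int × Int) (itens pending : List (Int × Int)) :
      0 < it.2 → Skel sol0 itens pending → Skel sol0 (it :: itens) (it :: pending)
  | drop (it : Int × Int) (itens pending : List (Int × Int)) :
      (it.2 ≤ 0 ∨ it ∈ sol0) → Skel sol0 itens pending → Skel sol0 (it :: itens) pending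

-- the `rest` accumulator of passB is a pure prefix
theorem passB_rest_acc (cap : Int) : ∀ (p sol : List (Int × Int)) (peso : Int)
    (r : List (Int × Int)) (m : Bool),
    passB cap p sol peso r m =
      ((passB cap p sol peso [] m).1, (passB cap p sol peso [] m).2.1,
        r ++ (passB cap p sol peso [] m).2.2.1, (passB cap p sol peso [] m).2.2.2) := by
  intro p
  induction p with
  | nil => intro sol peso r m; simp [passB]
  | cons it tl ih =>
    intro sol peso r m
    by_cases h1 : it ∈ sol
    · have e : ∀ r', passB cap (it :: tl) sol peso r' m = passB cap tl sol peso r' m := by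
        intro r'; simp only [passB]; rw [if_pos h1]
      rw [e r, e [], ih sol peso r m]
    · by_cases h2 : it.1 ≤ cap - peso
      · have e : ∀ r', passB cap (it :: tl) sol peso r' m
            = passB cap tl (sol ++ [it]) (peso + it.1) r' true := by
          intro r'; simp only [passB]; rw [if_neg h1, if_pos h2]
        rw [e r, e [], ih (sol ++ [it]) (peso + it.1) r true]
      · have e : ∀ r', passB cap (it :: tl) sol peso r' m
            = passB cap tl sol peso (r' ++ [it]) m := by
          intro r'; simp only [passB]; rw [if_neg h1, if_neg h2]
        rw [e r, e [], ih sol peso (r ++ [it]) m, ih sol peso ([] ++ [it]) m]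
        simp

theorem passB_rest_le (cap : Int) : ∀ (p sol : List (Int × Int)) (peso : Int)
    (r : List (Int × Int)) (m : Bool),
    (passB cap p sol peso r m).2.2.1.length ≤ r.length + p.length := by
  intro p
  induction p with
  | nil => intro sol peso r m; simp [passB]
  | cons it tl ih =>
    intro sol peso r m
    simp only [passB]
    by_cases h1 : it ∈ sol
    · rw [if_pos h1]
      have := ih sol peso r m
      simp only [List.length_cons]; omega
    · by_cases h2 : it.1 ≤ cap - peso
      · rw [if_neg h1, if_pos h2]
        have := ih (sol ++ [it]) (peso + it.1) r true
        simp only [List.length_cons]; omega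
      · rw [if_neg h1, if_neg h2]
        have := ih sol peso (r ++ [it]) m
        simp at this ⊢
        omega

theorem passB_rest_lt (cap : Int) : ∀ (p sol : List (Int × Int)) (peso : Int)
    (r : List (Int × Int)),
    (passB cap p sol peso r false).2.2.2 = true →
    (passB cap p sol peso r false).2.2.1.length < r.length + p.length := by
  intro p
  induction p with
  | nil => intro sol peso r h; simp [passB] at h
  | cons it tl ih =>
    intro sol peso r h
    simp only [passB] at h ⊢
    by_cases h1 : it ∈ sol
    · rw [if_pos h1] at h ⊢
      have := ih sol peso r h
      simp only [List.length_cons]; omega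
    · by_cases h2 : it.1 ≤ cap - peso
      · rw [if_neg h1, if_pos h2]
        have := passB_rest_le cap tl (sol ++ [it]) (peso + it.1) r true
        simp only [List.length_cons]; omega
      · rw [if_neg h1, if_neg h2] at h ⊢
        have := ih sol peso (r ++ [it]) h
        simp at this ⊢
        omega

-- one pass of A over itens behaves exactly like one pass of B over the worklist
theorem pass_sim (cap : Int) {itens pending sol0 : List (Int × Int)}
    (h : Skel sol0 itens pending) :
    ∀ (sol : List (Int × Int)) (m : Bool), (∀ x ∈ sol0, x ∈ sol) →
    (passA cap itens sol (valorTotal sol) m =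
      ((passB cap pending sol (pesoTotal sol) [] m).1,
       valorTotal (passB cap pending sol (pesoTotal sol) [] m).1,
       (passB cap pending sol (pesoTotal sol) [] m).2.2.2))
    ∧ (passB cap pending sol (pesoTotal sol) [] m).2.1 =
        pesoTotal (passB cap pending sol (pesoTotal sol) [] m).1
    ∧ (∀ x ∈ sol, x ∈ (passB cap pending sol (pesoTotal sol) [] m).1)
    ∧ Skel (passB cap pending sol (pesoTotal sol) [] m).1 itens
        (passB cap pending sol (pesoTotal sol) [] m).2.2.1 := by
  induction h with
  | nil =>
    intro sol m hsub
    exact ⟨rfl, rfl, fun x hx => hx, Skel.nil⟩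
  | keep it itens pending hv hsk ih =>
    intro sol m hsub
    by_cases h1 : it ∈ sol
    · -- A skips by membership, B drops it from the worklist
      have hA : passA cap (it :: itens) sol (valorTotal sol) m
          = passA cap itens sol (valorTotal sol) m := by
        simp only [passA]
        rw [if_neg (by simp [h1])]
      have hB : passB cap (it :: pending) sol (pesoTotal sol) [] m
          = passB cap pending sol (pesoTotal sol) [] m := by
        simp only [passB]; rw [if_pos h1]
      rw [hA, hB]
      obtain ⟨e1, e2, e3, e4⟩ := ih sol m hsub
      exact ⟨e1, e2, e3, Skel.drop it itens _ (Or.inr (e3 it h1)) e4⟩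
    · by_cases h2 : it.1 ≤ cap - pesoTotal sol
      · -- both add it (novo_valor exceeds melhor_valor since 0 < it.2)
        have hgt : (funcao_avaliacao (sol ++ [it])).1 > valorTotal sol := by
          show valorTotal (sol ++ [it]) > valorTotal sol
          rw [valorTotal_snoc]; omega
        have hA : passA cap (it :: itens) sol (valorTotal sol) m
            = passA cap itens (sol ++ [it]) (valorTotal (sol ++ [it])) true := by
          simp only [passA]
          rw [if_pos ⟨h1, h2⟩, if_pos hgt]
          simp [funcao_avaliacao]
        have hB : passB cap (it :: pending) sol (pesoTotal sol) [] m
            = passB cap pending (sol ++ [it]) (pesoTotal (sol ++ [it])) [] true := by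
          simp only [passB]
          rw [if_neg h1, if_pos h2, pesoTotal_snoc]
        rw [hA, hB]
        obtain ⟨e1, e2, e3, e4⟩ := ih (sol ++ [it]) true
          (fun x hx => List.mem_append_left _ (hsub x hx))
        refine ⟨e1, e2, fun x hx => e3 x (List.mem_append_left _ hx), ?_⟩
        exact Skel.drop it itens _ (Or.inr (e3 it (by simp))) e4
      · -- A skips by weight, B retains it in the worklist
        have hA : passA cap (it :: itens) sol (valorTotal sol) m
            = passA cap itens sol (valorTotal sol) m := by
          simp only [passA]
          rw [if_neg (fun hc => h2 hc.2)]
        have hB : passB cap (it :: pending) sol (pesoTotal sol) [] m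
            = passB cap pending sol (pesoTotal sol) [it] m := by
          simp only [passB]; rw [if_neg h1, if_neg h2]; simp
        rw [hA, hB, passB_rest_acc cap pending sol (pesoTotal sol) [it] m]
        obtain ⟨e1, e2, e3, e4⟩ := ih sol m hsub
        exact ⟨e1, e2, e3, Skel.keep it itens _ hv e4⟩
  | drop it itens pending hd hsk ih =>
    intro sol m hsub
    have hA : passA cap (it :: itens) sol (valorTotal sol) m
        = passA cap itens sol (valorTotal sol) m := by
      rcases hd with h1 | h1
      · by_cases hc : it ∉ sol ∧ it.1 ≤ cap - pesoTotal sol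
        · have hng : ¬ ((funcao_avaliacao (sol ++ [it])).1 > valorTotal sol) := by
            show ¬ (valorTotal (sol ++ [it]) > valorTotal sol)
            rw [valorTotal_snoc]; omega
          simp only [passA]
          rw [if_pos hc, if_neg hng]
        · simp only [passA]; rw [if_neg hc]
      · simp only [passA]
        rw [if_neg (by simp [hsub it h1])]
    rw [hA]
    obtain ⟨e1, e2, e3, e4⟩ := ih sol m hsub
    refine ⟨e1, e2, e3, Skel.drop it itens _ ?_ e4⟩
    rcases hd with h1 | h1
    · exact Or.inl h1
    · exact Or.inr (e3 it (hsub it h1))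

theorem loop_sim (cap : Int) (itens : List (Int × Int)) : ∀ (n : Nat) (sol pending : List (Int × Int)),
    pending.length < n → Skel sol itens pending →
    loopA cap itens n sol (valorTotal sol) = loopB cap n sol (pesoTotal sol) pending := by
  intro n
  induction n with
  | zero => intro sol pending h; omega
  | succ n ih =>
    intro sol pending hlen hsk
    obtain ⟨e1, e2, e3, e4⟩ := pass_sim cap hsk sol false (fun x hx => hx)
    by_cases hp : pending = []
    · subst hp
      simp only [passB] at e1
      simp only [loopA, loopB]
      rw [e1]
      simp
    · simp only [loopA, loopB, if_neg hp]
      rw [e1]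
      by_cases hm : (passB cap pending sol (pesoTotal sol) [] false).2.2.2 = true
      · rw [hm]
        simp only [if_true]
        have hlt := passB_rest_lt cap pending sol (pesoTotal sol) [] hm
        simp only [List.length_nil, Nat.zero_add] at hlt
        rw [e2]
        exact ih _ _ (by omega) e4
      · simp only [Bool.not_eq_true] at hm
        rw [hm]
        simp

theorem skel_filter (sol0 : List (Int × Int)) : ∀ (itens : List (Int × Int)),
    Skel sol0 itens (itens.filter (fun item => decide (0 < item.2))) := by
  intro itens
  induction itens with
  | nil => exact Skel.nil
  | cons it tl ih =>
    by_cases h : 0 < it.2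
    · simpa [List.filter_cons, h] using Skel.keep it tl _ h ih
    · simpa [List.filter_cons, h] using Skel.drop it tl _ (Or.inl (by omega)) ih

-- ===== VERDICT (by name: the statement is the Claim_ definition above) =====
theorem busca_local_spec : Claim_equal_busca_local := by
  intro solucao itens capacidade _hdom
  unfold Spec_busca_local busca_local busca_local_alt
  exact loop_sim capacidade itens (itens.length + 1) solucao _
    (Nat.lt_succ_of_le (List.length_filter_le _ _)) (skel_filter solucao itens)
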